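-- pv_equiv track=rewrite | github.com/ark2016/VK-Technopark-project-2024 | data_mining/tests/functions/file_121_140.py | find_even_numbers_in_string
-- ===== SOURCE A (Python) =====
-- def find_even_numbers_in_string(s):
--     result = []
--     current_num = ''
--     for char in s:
--         if char.isdigit():
--             current_num += char
--         elif current_num:
--             num = int(current_num)
--             if num % 2 == 0:
--                 result.append(num)
--             current_num = ''
--     if current_num:
--         num = int(current_num)
--         if num % 2 == 0:
--             result.append(num)
--     return result
-- ===== SOURCE B (Python) =====
-- def find_even_numbers_in_string(s):
--     result = []
--     i, n = 0, len(s)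
--     while i < n:
--         if s[i].isdigit():
--             j = i + 1
--             while j < n and s[j].isdigit():
--                 j += 1
--             num = int(s[i:j])
--             if num % 2 == 0:
--                 result.append(num)
--             i = j
--         else:
--             i += 1
--     return result
-- ===== Notes on version B (the rewrite author's own statement) =====
-- stated objective: alternative
-- what changed: A accumulates digits one character at a time into a string buffer flushed on the next non-digit (plus a trailing-buffer special case); B scans by runs: it jumps an index over each maximal digit run, converts the slice once, and needs no buffer or final flush.
import Mathlib
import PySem

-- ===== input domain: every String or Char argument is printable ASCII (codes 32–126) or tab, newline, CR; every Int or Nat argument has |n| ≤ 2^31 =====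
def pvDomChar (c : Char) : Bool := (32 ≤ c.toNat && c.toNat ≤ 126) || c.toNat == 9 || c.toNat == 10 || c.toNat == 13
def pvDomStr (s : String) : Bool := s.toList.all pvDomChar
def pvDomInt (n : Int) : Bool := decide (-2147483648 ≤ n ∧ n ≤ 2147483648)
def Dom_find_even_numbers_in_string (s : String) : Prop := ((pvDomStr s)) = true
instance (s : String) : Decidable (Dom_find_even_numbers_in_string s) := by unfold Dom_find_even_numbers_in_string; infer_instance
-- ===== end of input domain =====

-- B replaces A's char-by-char buffer with a run-jumping scanner; alternative decomposition, same O(n) cost.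

-- ===== PORT A =====
-- int(cs): inside both programs cs is a nonempty ASCII digit run, so int() succeeds; getD 0 is unreachable
def pyInt (cs : List Char) : Int := (PySem.Int.ofChars? cs).getD 0

-- the for-loop over the characters, state = (result, current_num); the [] case is the code after the loop
def goA : List Char → List Int → List Char → List Int
  | [], res, cur =>
      if cur.isEmpty then res
      else
        let num := pyInt cur
        if PySem.Int.mod num 2 == 0 then res ++ [num] else res
  | c :: rest, res, cur =>
      if PySem.Chars.isdigit c then goA rest res (cur ++ [c])
      else if !cur.isEmpty then
        let num := pyInt cur
        goA rest (if PySem.Int.mod num 2 == 0 then res ++ [num] else res) []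
      else goA rest res cur

def find_even_numbers_in_string (s : String) : List Int := goA s.toList [] []

-- ===== PORT B =====
-- outer while over positions; the inner digit scan j is takeWhile/dropWhile, s[i:j] = c :: run
def goB : List Char → List Int → List Int
  | [], res => res
  | c :: rest, res =>
      if PySem.Chars.isdigit c then
        let run := rest.takeWhile PySem.Chars.isdigit
        let rest' := rest.dropWhile PySem.Chars.isdigit
        let num := pyInt (c :: run)
        goB rest' (if PySem.Int.mod num 2 == 0 then res ++ [num] else res)
      else goB rest res
  termination_by l _ => l.length
  decreasing_by
    · exact Nat.lt_succ_of_le (List.length_dropWhile_le _ _)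
    · exact Nat.lt_succ_self _

def find_even_numbers_in_string_alt (s : String) : List Int := goB s.toList []

-- ===== PRECONDITION & SPEC =====
def Spec_find_even_numbers_in_string (s : String) (out : List Int) : Prop := out = find_even_numbers_in_string_alt s
instance (s : String) (out : List Int) : Decidable (Spec_find_even_numbers_in_string s out) := by unfold Spec_find_even_numbers_in_string; infer_instance

-- ===== CLAIM (what is proved, stated in full; the proofs are below) =====
def Claim_equal_find_even_numbers_in_string : Prop := ∀ (s : String), Dom_find_even_numbers_in_string s → Spec_find_even_numbers_in_string s (find_even_numbers_in_string s)

-- ===== LEMMAS AND PROOFS =====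

lemma takeWhile_digits_append {p : Char → Bool} (ds : List Char) (c : Char) (rest : List Char)
    (h : ∀ x ∈ ds, p x = true) (hc : p c = false) :
    (ds ++ c :: rest).takeWhile p = ds := by
  induction ds with
  | nil => simp [hc]
  | cons d ds ih =>
      have hd : p d = true := h d (by simp)
      simp [hd, ih (fun x hx => h x (by simp [hx]))]

lemma dropWhile_digits_append {p : Char → Bool} (ds : List Char) (c : Char) (rest : List Char)
    (h : ∀ x ∈ ds, p x = true) (hc : p c = false) :
    (ds ++ c :: rest).dropWhile p = c :: rest := by
  induction ds with
  | nil => simp [hc]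
  | cons d ds ih =>
      have hd : p d = true := h d (by simp)
      simp [hd, ih (fun x hx => h x (by simp [hx]))]

lemma goA_eq_goB (l : List Char) : ∀ (res : List Int) (cur : List Char),
    (∀ x ∈ cur, PySem.Chars.isdigit x = true) → goA l res cur = goB (cur ++ l) res := by
  induction l with
  | nil =>
      intro res cur h
      cases cur with
      | nil => simp [goA, goB]
      | cons c cs =>
          have hc : PySem.Chars.isdigit c = true := h c (by simp)
          have hcs : ∀ x ∈ cs, PySem.Chars.isdigit x = true := fun x hx => h x (by simp [hx])
          simp [goA, goB, hc, List.takeWhile_eq_self_iff.mpr hcs,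
            List.dropWhile_eq_nil_iff.mpr (fun x hx => hcs x hx)]
  | cons c rest ih =>
      intro res cur h
      by_cases hc : PySem.Chars.isdigit c = true
      · have h' : ∀ x ∈ cur ++ [c], PySem.Chars.isdigit x = true := by
          intro x hx; rcases List.mem_append.1 hx with hx | hx
          · exact h x hx
          · simp at hx; simpa [hx] using hc
        rw [show cur ++ c :: rest = (cur ++ [c]) ++ rest by simp]
        rw [← ih res (cur ++ [c]) h']
        simp [goA, hc]
      · have hc' : PySem.Chars.isdigit c = false := by simpa using hc
        cases cur with
        | nil => simp [goA, goB, hc', ih res [] (by simp)]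
        | cons d ds =>
            have hd : PySem.Chars.isdigit d = true := h d (by simp)
            have hds : ∀ x ∈ ds, PySem.Chars.isdigit x = true := fun x hx => h x (by simp [hx])
            have htw := takeWhile_digits_append ds c rest hds hc'
            have hdw := dropWhile_digits_append ds c rest hds hc'
            simp only [goA, hc', List.isEmpty_cons, Bool.not_false, if_true,
              List.cons_append, goB, hd, htw, hdw]
            simp only [Bool.false_eq_true, if_false]
            exact ih _ [] (by simp)

-- ===== VERDICT (by name: the statement is the Claim_ definition above) =====
theorem find_even_numbers_in_string_spec : Claim_equal_find_even_numbers_in_string := by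
  intro s _
  unfold Spec_find_even_numbers_in_string find_even_numbers_in_string find_even_numbers_in_string_alt
  simpa using goA_eq_goB s.toList [] [] (by simp)
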